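-- pv_equiv track=rewrite | github.com/nahkh/aoc2015-py | day11.py | password_contains_two_pairs
-- ===== SOURCE A (Python) =====
-- def password_contains_two_pairs(password: str) -> bool:
--     pair_count = 0
--     prev_char = None
--     for c in password:
--         if c == prev_char:
--             pair_count += 1
--             prev_char = None
--             continue
--         prev_char = c
--     return pair_count >= 2
-- ===== SOURCE B (Python) =====
-- def password_contains_two_pairs(password: str) -> bool:
--     # Stage 1: locate the first adjacent duplicate; stage 2: any adjacent
--     # duplicate anywhere in the remainder after it (no counting, no skipping).
--     for i in range(len(password) - 1):
--         if password[i] == password[i + 1]: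
--             tail = password[i + 2:]
--             return any(a == b for a, b in zip(tail, tail[1:]))
--     return False
-- ===== Notes on version B (the rewrite author's own statement) =====
-- stated objective: alternative
-- what changed: Instead of A's single counting pass with a prev_char sentinel, B decomposes the question logically: it early-returns at the first adjacent duplicate and then only asks whether ANY adjacent duplicate exists in the remaining suffix (a pure existence check via zip, no counter, no skip/reset state; both stages stop as soon as the answer is determined).
import Mathlib
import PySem

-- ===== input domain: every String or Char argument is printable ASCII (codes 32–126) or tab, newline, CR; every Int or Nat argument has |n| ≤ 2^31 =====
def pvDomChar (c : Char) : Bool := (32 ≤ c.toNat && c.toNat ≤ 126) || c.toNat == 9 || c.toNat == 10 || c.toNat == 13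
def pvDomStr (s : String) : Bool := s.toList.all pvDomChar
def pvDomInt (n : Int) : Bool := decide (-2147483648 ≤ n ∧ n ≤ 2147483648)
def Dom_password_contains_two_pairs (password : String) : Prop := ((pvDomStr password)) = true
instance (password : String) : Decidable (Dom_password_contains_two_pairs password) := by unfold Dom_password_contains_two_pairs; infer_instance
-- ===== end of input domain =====

-- B replaces A's counting state machine by a staged existence check: early-return at the first adjacent duplicate, then just ask whether ANY adjacent duplicate occurs in the remaining suffix (alternative decomposition, same cost).

-- ===== PORT A =====
-- the for-loop over the characters with state (pair_count, prev_char)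
def pvLoopA : List Char → Int → Option Char → Int
  | [], pair_count, _ => pair_count
  | c :: rest, pair_count, prev_char =>
      if some c = prev_char then pvLoopA rest (pair_count + 1) none
      else pvLoopA rest pair_count (some c)

def password_contains_two_pairs (password : String) : Bool :=
  decide (2 ≤ pvLoopA password.toList 0 none)

-- ===== PORT B =====
-- stage 2: any(a == b for a, b in zip(tail, tail[1:]))
def pvHasAdj : List Char → Bool
  | a :: b :: rest => a == b || pvHasAdj (b :: rest)
  | _ => false

-- stage 1: the for-loop over i that early-returns at the first adjacent duplicate
def pvFindFirst : List Char → Bool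
  | a :: b :: rest => if a = b then pvHasAdj rest else pvFindFirst (b :: rest)
  | _ => false

def password_contains_two_pairs_alt (password : String) : Bool :=
  pvFindFirst password.toList

-- ===== PRECONDITION & SPEC =====
def Spec_password_contains_two_pairs (password : String) (out : Bool) : Prop := out = password_contains_two_pairs_alt password
instance (password : String) (out : Bool) : Decidable (Spec_password_contains_two_pairs password out) := by unfold Spec_password_contains_two_pairs; infer_instance

-- ===== CLAIM (what is proved, stated in full; the proofs are below) =====
def Claim_equal_password_contains_two_pairs : Prop := ∀ (password : String), Dom_password_contains_two_pairs password → Spec_password_contains_two_pairs password (password_contains_two_pairs password)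

-- ===== LEMMAS AND PROOFS =====

-- greedy non-overlapping pair count, the value A's loop computes
def pvG : List Char → Int
  | a :: b :: rest => if a = b then 1 + pvG rest else pvG (b :: rest)
  | _ => 0

theorem pvG_nonneg (l : List Char) : 0 ≤ pvG l := by
  induction l using pvG.induct with
  | case1 b rest ih => simp [pvG]; omega
  | case2 a b rest h ih => simpa [pvG, h] using ih
  | case3 l hne =>
      match l, hne with
      | [], _ => simp [pvG]
      | [c], _ => simp [pvG]
      | a :: b :: rest, hne => exact absurd rfl (fun h => hne a b rest h)

theorem pvLoopA_eq (l : List Char) : ∀ n : Int, pvLoopA l n none = n + pvG l := by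
  induction l using pvG.induct with
  | case1 b rest ih =>
      intro n
      simp [pvLoopA, pvG, ih]
      ring
  | case2 a b rest h ih =>
      intro n
      have h2 : pvLoopA (a :: b :: rest) n none = pvLoopA rest n (some b) := by
        simp [pvLoopA, Ne.symm h]
      have h3 : pvLoopA (b :: rest) n none = pvLoopA rest n (some b) := by
        simp [pvLoopA]
      rw [h2, ← h3, ih]
      simp [pvG, h]
  | case3 l hne =>
      intro n
      match l, hne with
      | [], _ => simp [pvLoopA, pvG]
      | [c], _ => simp [pvLoopA, pvG]
      | a :: b :: rest, hne => exact absurd rfl (fun h => hne a b rest h)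

theorem pvHasAdj_eq (l : List Char) : pvHasAdj l = decide (1 ≤ pvG l) := by
  induction l using pvG.induct with
  | case1 b rest ih =>
      have := pvG_nonneg rest
      simp [pvHasAdj, pvG]
      omega
  | case2 a b rest h ih => rw [pvHasAdj, ih]; simp [pvG, h]
  | case3 l hne =>
      match l, hne with
      | [], _ => simp [pvHasAdj, pvG]
      | [c], _ => simp [pvHasAdj, pvG]
      | a :: b :: rest, hne => exact absurd rfl (fun h => hne a b rest h)

theorem pvFindFirst_eq (l : List Char) : pvFindFirst l = decide (2 ≤ pvG l) := by
  induction l using pvG.induct with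
  | case1 b rest ih =>
      rw [pvFindFirst, if_pos rfl, pvHasAdj_eq]
      simp [pvG]
      omega
  | case2 a b rest h ih =>
      rw [pvFindFirst, if_neg h, ih]
      simp [pvG, h]
  | case3 l hne =>
      match l, hne with
      | [], _ => simp [pvFindFirst, pvG]
      | [c], _ => simp [pvFindFirst, pvG]
      | a :: b :: rest, hne => exact absurd rfl (fun h => hne a b rest h)

-- ===== VERDICT (by name: the statement is the Claim_ definition above) =====
theorem password_contains_two_pairs_spec : Claim_equal_password_contains_two_pairs := by
  intro password _
  unfold Spec_password_contains_two_pairs password_contains_two_pairs password_contains_two_pairs_alt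
  rw [pvLoopA_eq, pvFindFirst_eq]
  simp
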